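-- pv_equiv track=rewrite | github.com/aarbys/EGE-TRAINER | two.py | checking_for_all_var_uses
-- ===== SOURCE A (Python) =====
-- def checking_for_all_var_uses(problem_string: str, usable_variables: tuple):
--     usable_variables_duplicate = list(usable_variables)
--     for i in problem_string:
--         if i in usable_variables_duplicate:
--             usable_variables_duplicate.remove(i)
--     if len(usable_variables_duplicate) != 0:
--         return False
--     return True
-- ===== SOURCE B (Python) =====
-- def checking_for_all_var_uses(problem_string: str, usable_variables: tuple):
--     chars = list(problem_string)
--     return all(chars.count(v) >= usable_variables.count(v) for v in usable_variables)
-- ===== Notes on version B (the rewrite author's own statement) =====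
-- stated objective: simpler
-- what changed: Replaces A's stateful consuming loop (walk the string, deleting one matched pending variable per character from a shrinking list) by a stateless count comparison: for every variable, the string's character count must be at least the variable list's count; the per-character Python-level membership test and list.remove disappear in favour of one C-level count per variable.
import Mathlib
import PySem

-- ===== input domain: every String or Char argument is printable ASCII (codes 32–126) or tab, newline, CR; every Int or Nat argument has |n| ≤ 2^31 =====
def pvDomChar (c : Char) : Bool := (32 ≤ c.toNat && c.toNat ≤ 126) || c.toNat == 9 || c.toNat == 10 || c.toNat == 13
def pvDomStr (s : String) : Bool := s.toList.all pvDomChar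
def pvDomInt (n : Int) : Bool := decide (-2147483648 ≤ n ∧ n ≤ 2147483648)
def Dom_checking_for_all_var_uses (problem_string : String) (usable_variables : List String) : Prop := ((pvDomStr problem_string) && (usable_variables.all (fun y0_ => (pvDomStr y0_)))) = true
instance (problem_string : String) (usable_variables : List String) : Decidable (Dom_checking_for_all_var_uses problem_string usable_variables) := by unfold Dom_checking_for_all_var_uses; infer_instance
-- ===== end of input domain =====

-- B replaces A's consuming loop (walk the string, deleting one pending variable per matching
-- character) by a direct count comparison: each variable must occur in the string at least as
-- often as it occurs in the variable list.  Objective: simpler; no speed claim.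

-- ===== PORT A =====
def checking_for_all_var_uses (problem_string : String) (usable_variables : List String) : Bool :=
  -- usable_variables_duplicate = list(usable_variables); for i in problem_string: if i in dup: dup.remove(i)
  let dup := problem_string.toList.foldl (fun d c =>
    let cs := String.mk [c]
    if cs ∈ d then (PySem.List.remove? d cs).getD d else d) usable_variables
  if dup.length ≠ 0 then false else true

-- ===== PORT B =====
def checking_for_all_var_uses_alt (problem_string : String) (usable_variables : List String) : Bool :=
  -- chars = list(problem_string); all(chars.count(v) >= usable_variables.count(v) for v in usable_variables)
  let chars := problem_string.toList.map (fun c => String.mk [c])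
  usable_variables.all (fun v => PySem.List.count chars v ≥ PySem.List.count usable_variables v)

-- ===== PRECONDITION & SPEC =====
def Spec_checking_for_all_var_uses (problem_string : String) (usable_variables : List String) (out : Bool) : Prop := out = checking_for_all_var_uses_alt problem_string usable_variables
instance (problem_string : String) (usable_variables : List String) (out : Bool) : Decidable (Spec_checking_for_all_var_uses problem_string usable_variables out) := by unfold Spec_checking_for_all_var_uses; infer_instance

-- ===== CLAIM (what is proved, stated in full; the proofs are below) =====
def Claim_equal_checking_for_all_var_uses : Prop := ∀ (problem_string : String) (usable_variables : List String), Dom_checking_for_all_var_uses problem_string usable_variables → Spec_checking_for_all_var_uses problem_string usable_variables (checking_for_all_var_uses problem_string usable_variables)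

-- ===== LEMMAS AND PROOFS =====

-- one step of A's loop changes the count of each value by a saturating decrement at the char's value
theorem pv_step_count (d : List String) (c : Char) (v : String) :
    ((if String.mk [c] ∈ d then (PySem.List.remove? d (String.mk [c])).getD d else d).count v)
      = d.count v - (if String.mk [c] = v then 1 else 0) := by
  by_cases h : String.mk [c] ∈ d
  · simp only [h, if_pos, PySem.List.remove?_eq_some_erase _ _ h, Option.getD_some]
    rw [List.count_erase]
    simp [beq_iff_eq]
  · simp only [h, if_neg, not_false_iff]
    by_cases hv : String.mk [c] = v
    · subst hv
      have : d.count (String.mk [c]) = 0 := List.count_eq_zero.mpr h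
      simp [this]
    · simp [hv]

-- A's whole loop: final count = initial count minus the string's count (ℕ subtraction)
theorem pv_fold_count (cs : List Char) (d : List String) (v : String) :
    ((cs.foldl (fun d c =>
        let cs := String.mk [c]
        if cs ∈ d then (PySem.List.remove? d cs).getD d else d) d).count v)
      = d.count v - (cs.map (fun c => String.mk [c])).count v := by
  induction cs generalizing d with
  | nil => simp
  | cons c cs ih =>
      simp only [List.foldl_cons, List.map_cons, List.count_cons]
      rw [ih, pv_step_count]
      by_cases hv : String.mk [c] = v <;> simp [hv, beq_iff_eq, Nat.sub_sub, Nat.add_comm]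

-- ===== VERDICT (by name: the statement is the Claim_ definition above) =====
theorem checking_for_all_var_uses_spec : Claim_equal_checking_for_all_var_uses := by
  intro ps uv _
  unfold Spec_checking_for_all_var_uses checking_for_all_var_uses checking_for_all_var_uses_alt
  simp only [PySem.List.count_eq]
  rw [Bool.eq_iff_iff]
  simp only [List.all_eq_true, decide_eq_true_eq, ge_iff_le]
  constructor
  · intro h v hv
    by_contra hlt
    simp only [not_le] at hlt
    split_ifs at h with hlen
    simp only [ne_eq, not_not, List.length_eq_zero_iff] at hlen
    have hz := pv_fold_count ps.toList uv v
    rw [hlen] at hz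
    simp at hz
    omega
  · intro h
    have hempty : ∀ v, ((ps.toList.foldl (fun d c =>
        let cs := String.mk [c]
        if cs ∈ d then (PySem.List.remove? d cs).getD d else d) uv).count v) = 0 := by
      intro v
      rw [pv_fold_count]
      by_cases hv : v ∈ uv
      · exact Nat.sub_eq_zero_of_le (h v hv)
      · simp [List.count_eq_zero.mpr hv]
    have : (ps.toList.foldl (fun d c =>
        let cs := String.mk [c]
        if cs ∈ d then (PySem.List.remove? d cs).getD d else d) uv) = [] := by
      apply List.eq_nil_iff_forall_not_mem.mpr
      intro v hv
      exact absurd (hempty v) (by simp [List.count_eq_zero, hv])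
    simp [this]
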